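-- pv_equiv track=rewrite | github.com/kiransivasai/hackerearth_problems | hihi_and_crazy_bits.py | great
-- ===== SOURCE A (Python) =====
-- def great(n):
--     p=1
--     s=0
--     while True:
--         if(((n>>s)&1)%2==0):
--             break;
--         s+=1
--         p*=2
--     return n+p
-- ===== SOURCE B (Python) =====
-- def great(n):
--     # n plus the value of its lowest zero bit, i.e. set the lowest clear bit
--     return n | (n + 1)
-- ===== Notes on version B (the rewrite author's own statement) =====
-- stated objective: simpler
-- what changed: A counts trailing one-bits in a loop to build p = 2^s and returns n + p; B replaces the whole loop by the closed-form bit identity n | (n + 1), which sets the lowest clear bit directly.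
-- outside the precondition, e.g. on great(-1): A does not finish within the time limit, B returns -1
import Mathlib
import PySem

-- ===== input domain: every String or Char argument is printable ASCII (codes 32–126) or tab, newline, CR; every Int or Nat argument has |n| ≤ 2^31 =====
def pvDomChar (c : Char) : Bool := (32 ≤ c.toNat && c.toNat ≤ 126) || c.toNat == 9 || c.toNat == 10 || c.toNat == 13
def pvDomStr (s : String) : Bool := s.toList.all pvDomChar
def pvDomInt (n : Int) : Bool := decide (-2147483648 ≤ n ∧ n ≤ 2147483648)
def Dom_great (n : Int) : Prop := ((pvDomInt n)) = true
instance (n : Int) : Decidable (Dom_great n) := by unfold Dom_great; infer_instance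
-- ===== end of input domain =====

-- B replaces A's trailing-ones loop by the closed-form bit identity n | (n + 1) (objective: simpler).


-- ===== PORT A =====
-- the 'while True' loop; fuel only makes it total (within Dom ∧ Pre it exits long before 64 steps)
def greatLoop (n : Int) (s : Nat) (p : Int) : Nat → Int
  | 0 => n + p
  | fuel + 1 =>
    if PySem.Int.mod (PySem.Int.band (n >>> s) 1) 2 = 0 then n + p
    else greatLoop n (s + 1) (p * 2) fuel

def great (n : Int) : Int := greatLoop n 0 1 64

-- ===== PORT B =====
def great_alt (n : Int) : Int := PySem.Int.bor n (n + 1)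

-- ===== PRECONDITION & SPEC =====
-- Pre_ excludes exactly n = -1, on which A's while-loop never terminates (every bit is 1).
def Pre_great (n : Int) : Prop := n ≠ -1
instance (n : Int) : Decidable (Pre_great n) := by unfold Pre_great; infer_instance
def pvWitness_great : Int := 5
def Spec_great (n : Int) (out : Int) : Prop := out = great_alt n
instance (n : Int) (out : Int) : Decidable (Spec_great n out) := by unfold Spec_great; infer_instance

-- ===== CLAIM (what is proved, stated in full; the proofs are below) =====
def Claim_equal_great : Prop := ∀ (n : Int), Dom_great n → Pre_great n → Spec_great n (great n)

-- ===== LEMMAS AND PROOFS =====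

-- proof-only model of the loop: the factor it multiplies p by, driven by halving
def lowG : Int → Nat → Int
  | _, 0 => 1
  | m, fuel + 1 => if PySem.Int.mod m 2 = 0 then 1 else 2 * lowG (m >>> (1 : Nat)) fuel

theorem mod_band_one (x : Int) :
    PySem.Int.mod (PySem.Int.band x 1) 2 = PySem.Int.mod x 2 := by
  rw [PySem.Int.band_one]
  have h0 := PySem.Int.mod_nonneg x (b := 2) (by norm_num)
  have h1 := PySem.Int.mod_lt x (b := 2) (by norm_num)
  interval_cases h : PySem.Int.mod x 2 <;> decide

theorem shiftRight_succ' (n : Int) (s : Nat) : (n >>> s) >>> (1 : Nat) = n >>> (s + 1) := by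
  simp only [Int.shiftRight_eq_div_pow]
  rw [Int.ediv_ediv_of_nonneg (by positivity)]
  norm_num [pow_succ]

theorem loop_eq_lowG (fuel : Nat) : ∀ (n : Int) (s : Nat) (p : Int),
    greatLoop n s p fuel = n + p * lowG (n >>> s) fuel := by
  induction fuel with
  | zero => intro n s p; simp [greatLoop, lowG]
  | succ f ih =>
    intro n s p
    rw [greatLoop, lowG, mod_band_one]
    split_ifs with h
    · ring
    · rw [ih n (s + 1) (p * 2), shiftRight_succ']
      ring

theorem odd_shift (k : Int) : (2 * k + 1) >>> (1 : Nat) = k := by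
  rw [Int.shiftRight_eq_div_pow]
  norm_num
  omega

-- E0: m even → m | (m+1) = m + 1
theorem bor_even (k : Int) : PySem.Int.bor (2 * k) (2 * k + 1) = 2 * k + 1 := by
  unfold PySem.Int.bor
  rcases le_or_gt 0 k with hk | hk
  · rw [if_pos (by omega), if_pos (by omega)]
    have h1 : (2 * k).toNat = Nat.bit false k.toNat := by simp [Nat.bit]; omega
    have h2 : (2 * k + 1).toNat = Nat.bit true k.toNat := by simp [Nat.bit]; omega
    rw [h1, h2, Nat.lor_bit]
    simp [Nat.bit]; omega
  · rw [if_neg (by omega), if_neg (by omega)]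
    have h1 : (-(2 * k) - 1).toNat = Nat.bit true (-k - 1).toNat := by simp [Nat.bit]; omega
    have h2 : (-(2 * k + 1) - 1).toNat = Nat.bit false (-k - 1).toNat := by simp [Nat.bit]; omega
    rw [h1, h2, Nat.land_bit]
    simp [Nat.bit]; omega

-- E1: the odd step: (2k+1) | (2k+2) = 2 * (k | (k+1)) + 1
theorem bor_odd (k : Int) :
    PySem.Int.bor (2 * k + 1) (2 * k + 2) = 2 * PySem.Int.bor k (k + 1) + 1 := by
  unfold PySem.Int.bor
  rcases le_or_gt 0 k with hk | hk
  · rw [if_pos (by omega), if_pos (by omega), if_pos (by omega), if_pos (by omega)]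
    have h1 : (2 * k + 1).toNat = Nat.bit true k.toNat := by simp [Nat.bit]; omega
    have h2 : (2 * k + 2).toNat = Nat.bit false (k + 1).toNat := by simp [Nat.bit]; omega
    rw [h1, h2, Nat.lor_bit]
    simp [Nat.bit]
  · rcases eq_or_lt_of_le (by omega : k ≤ -1) with hk1 | hk1
    · subst_vars; decide
    · rw [if_neg (by omega), if_neg (by omega), if_neg (by omega), if_neg (by omega)]
      have h1 : (-(2 * k + 1) - 1).toNat = Nat.bit false (-k - 1).toNat := by simp [Nat.bit]; omega
      have h2 : (-(2 * k + 2) - 1).toNat = Nat.bit true (-(k + 1) - 1).toNat := by simp [Nat.bit]; omega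
      have h3 : (-(k + 1) - 1).toNat = (-k - 1).toNat - 1 := by omega
      rw [h1, h2, Nat.land_bit]
      simp only [Nat.bit, Bool.false_and, cond_false]
      have : (-k - 1).toNat &&& (-(k + 1) - 1).toNat ≤ (-k - 1).toNat := Nat.and_le_left
      omega

theorem lowG_eq_bor (fuel : Nat) : ∀ (m : Int), m ≠ -1 → (m + 1).natAbs ≤ 2 ^ fuel →
    m + lowG m fuel = PySem.Int.bor m (m + 1) := by
  induction fuel with
  | zero =>
    intro m hm hb
    have : m = 0 ∨ m = -2 := by omega
    rcases this with h | h <;> subst h <;> decide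
  | succ f ih =>
    intro m hm hb
    rw [lowG]
    split_ifs with h
    · -- m even
      obtain ⟨k, hk⟩ : (2 : Int) ∣ m := (PySem.Int.mod_eq_zero_iff_dvd m 2).mp h
      subst hk
      have := bor_even k
      omega
    · -- m odd
      have hmod := PySem.Int.mod_two_eq m
      have hodd : PySem.Int.mod m 2 = 1 := by rcases hmod with h' | h' <;> omega
      obtain ⟨k, hk⟩ : ∃ k, m = 2 * k + 1 := by
        have := PySem.Int.floordiv_mul_add_mod m 2
        exact ⟨PySem.Int.floordiv m 2, by omega⟩
      subst hk
      rw [odd_shift]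
      have hk1 : k ≠ -1 := by intro h'; subst h'; omega
      have hb' : (k + 1).natAbs ≤ 2 ^ f := by
        have : ((2 * k + 1) + 1).natAbs = 2 * (k + 1).natAbs := by omega
        omega
      have := ih k hk1 hb'
      have := bor_odd k
      rw [show (2 * k + 1) + 1 = 2 * k + 2 by ring]
      omega

-- ===== VERDICT (by name: the statement is the Claim_ definition above) =====
theorem great_spec : Claim_equal_great := by
  intro n hdom hpre
  unfold Spec_great great great_alt
  rw [loop_eq_lowG]
  simp only [Int.shiftRight_zero, one_mul]
  apply lowG_eq_bor
  · exact hpre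
  · unfold Dom_great pvDomInt at hdom
    simp only [decide_eq_true_eq] at hdom
    have : (n + 1).natAbs ≤ 2147483649 := by omega
    calc (n + 1).natAbs ≤ 2147483649 := this
      _ ≤ 2 ^ 64 := by norm_num
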